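-- pv_equiv track=rewrite | github.com/sebastiencs/icons-in-terminal | generate-font.py | is_default_name
-- ===== SOURCE A (Python) =====
-- import string
--
-- def is_default_name(name):
--     if len(name) != 7:
--         return False
--     if not name.startswith("uni"):
--         return False
--     if not all(c in string.hexdigits for c in name[-4:]):
--         return False
--     return True
-- ===== SOURCE B (Python) =====
-- import string
--
-- # B: a table-driven finite automaton run as a single fold over the characters.
-- # States 0..2 expect the literal 'u','n','i'; states 3..6 expect a hex digit;
-- # state 7 is accepting; -1 is the dead state (mismatch or trailing character).
-- def _step(state, c):
--     if state == 0 or state == 1 or state == 2: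
--         return state + 1 if c == "uni"[state] else -1
--     if 3 <= state <= 6:
--         return state + 1 if c in string.hexdigits else -1
--     return -1
--
-- def is_default_name(name):
--     state = 0
--     for c in name:
--         state = _step(state, c)
--         if state < 0:
--             return False
--     return state == 7
-- ===== Notes on version B (the rewrite author's own statement) =====
-- stated objective: alternative
-- what changed: Replaces A's three staged checks (length, startswith, all()-loop over the sliced hex suffix) by a single-pass table-driven finite automaton: one fold over the characters maintaining a state counter, with no length computation, no prefix test and no slicing.
import Mathlib
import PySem

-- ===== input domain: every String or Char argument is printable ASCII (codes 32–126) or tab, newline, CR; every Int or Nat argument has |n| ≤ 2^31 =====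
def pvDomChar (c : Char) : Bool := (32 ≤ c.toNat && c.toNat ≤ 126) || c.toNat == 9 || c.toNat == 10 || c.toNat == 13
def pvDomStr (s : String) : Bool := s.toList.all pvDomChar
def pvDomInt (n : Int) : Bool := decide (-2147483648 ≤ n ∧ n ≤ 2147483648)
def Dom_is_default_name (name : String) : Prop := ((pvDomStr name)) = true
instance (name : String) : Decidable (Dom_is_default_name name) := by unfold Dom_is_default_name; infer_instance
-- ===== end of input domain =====

-- B replaces A's staged checks (length, prefix, all()-loop over a slice) by a single-pass
-- table-driven finite automaton over the characters; same cost, a different algorithm.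

-- ===== PORT A =====
-- string.hexdigits
def pvHexdigits : List Char := "0123456789abcdefABCDEF".toList

def is_default_name (name : String) : Bool :=
  if PySem.Str.len name ≠ 7 then false
  else if !(PySem.Str.startswith name "uni") then false
  else if !((PySem.Str.slice name (some (-4)) none).toList.all
              (fun c => PySem.Chars.isIn [c] pvHexdigits)) then false
  else true

-- ===== PORT B =====
-- _step: the automaton's transition table
def pvStep (state : Int) (c : Char) : Int :=
  if state = 0 ∨ state = 1 ∨ state = 2 then
    if some c = PySem.Str.pyGet? "uni" state then state + 1 else -1
  else if 3 ≤ state ∧ state ≤ 6 then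
    if PySem.Chars.isIn [c] pvHexdigits then state + 1 else -1
  else -1

-- the 'for c in name' loop with its early 'return False'
def pvRun (state : Int) (l : List Char) : Bool :=
  match l with
  | [] => state == 7
  | c :: rest =>
      let s := pvStep state c
      if s < 0 then false else pvRun s rest

def is_default_name_alt (name : String) : Bool :=
  pvRun 0 name.toList

-- ===== PRECONDITION & SPEC =====
def Spec_is_default_name (name : String) (out : Bool) : Prop := out = is_default_name_alt name
instance (name : String) (out : Bool) : Decidable (Spec_is_default_name name out) := by unfold Spec_is_default_name; infer_instance

-- ===== CLAIM (what is proved, stated in full; the proofs are below) =====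
def Claim_equal_is_default_name : Prop := ∀ (name : String), Dom_is_default_name name → Spec_is_default_name name (is_default_name name)

-- ===== LEMMAS AND PROOFS =====

-- the regex character class equals Python's 'c in string.hexdigits'
def pvHex (c : Char) : Bool :=
  ('0' ≤ c && c ≤ '9') || ('a' ≤ c && c ≤ 'f') || ('A' ≤ c && c ≤ 'F')

theorem pv_isIn_hex (c : Char) : PySem.Chars.isIn [c] pvHexdigits = pvHex c := by
  have hmem : c ∈ pvHexdigits ↔ pvHex c = true := by
    have hlist : pvHexdigits = ['0','1','2','3','4','5','6','7','8','9','a','b','c','d','e','f','A','B','C','D','E','F'] := by decide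
    rw [hlist]
    constructor
    · intro h
      simp only [List.mem_cons, List.not_mem_nil, or_false] at h
      rcases h with h|h|h|h|h|h|h|h|h|h|h|h|h|h|h|h|h|h|h|h|h|h <;> rw [h] <;> decide
    · intro h
      simp only [pvHex, Bool.or_eq_true, Bool.and_eq_true, decide_eq_true_eq] at h
      rcases h with (⟨h1,h2⟩|⟨h1,h2⟩)|⟨h1,h2⟩
      · have b1 : 48 ≤ c.toNat := by simpa using UInt32.le_iff_toNat_le.mp (Char.le_def.mp h1)
        have b2 : c.toNat ≤ 57 := by simpa using UInt32.le_iff_toNat_le.mp (Char.le_def.mp h2)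
        rw [show c = Char.ofNat c.toNat from (Char.ofNat_toNat c).symm]
        generalize c.toNat = n at b1 b2 ⊢
        interval_cases n <;> decide
      · have b1 : 97 ≤ c.toNat := by simpa using UInt32.le_iff_toNat_le.mp (Char.le_def.mp h1)
        have b2 : c.toNat ≤ 102 := by simpa using UInt32.le_iff_toNat_le.mp (Char.le_def.mp h2)
        rw [show c = Char.ofNat c.toNat from (Char.ofNat_toNat c).symm]
        generalize c.toNat = n at b1 b2 ⊢
        interval_cases n <;> decide
      · have b1 : 65 ≤ c.toNat := by simpa using UInt32.le_iff_toNat_le.mp (Char.le_def.mp h1)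
        have b2 : c.toNat ≤ 70 := by simpa using UInt32.le_iff_toNat_le.mp (Char.le_def.mp h2)
        rw [show c = Char.ofNat c.toNat from (Char.ofNat_toNat c).symm]
        generalize c.toNat = n at b1 b2 ⊢
        interval_cases n <;> decide
  have h1 : PySem.Chars.isIn [c] pvHexdigits = true ↔ pvHex c = true := by
    rw [PySem.Chars.isIn_iff_infix, List.singleton_infix_iff]
    exact hmem
  rcases hb : pvHex c with _ | _ <;> rcases ha : PySem.Chars.isIn [c] pvHexdigits with _ | _ <;>
    simp_all

-- each transition either increments the state or goes to the dead state
theorem pvStep_cases (s : Int) (c : Char) : pvStep s c = s + 1 ∨ pvStep s c = -1 := by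
  unfold pvStep
  split_ifs <;> simp

-- a successful run starting at state s consumes exactly 7 - s characters
theorem pvRun_length (l : List Char) : ∀ s : Int, pvRun s l = true → s + l.length = 7 := by
  induction l with
  | nil => intro s h; simp [pvRun] at h; simp; omega
  | cons c rest ih =>
      intro s h
      simp only [pvRun] at h
      by_cases hs : pvStep s c < 0
      · simp [hs] at h
      · rw [if_neg hs] at h
        have := ih (pvStep s c) h
        rcases pvStep_cases s c with he | he <;> rw [he] at this <;> simp [List.length_cons] <;> omega

theorem pvStep_lit (s : Int) (ch : Char) (c : Char) (hs : s = 0 ∨ s = 1 ∨ s = 2)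
    (hg : PySem.Str.pyGet? "uni" s = some ch) : pvStep s c = if c = ch then s + 1 else -1 := by
  unfold pvStep
  rw [if_pos hs, hg]
  by_cases h : c = ch <;> simp [h]

theorem pvStep0 (c : Char) : pvStep 0 c = if c = 'u' then 1 else -1 :=
  pvStep_lit 0 'u' c (by norm_num) (by decide)

theorem pvStep1 (c : Char) : pvStep 1 c = if c = 'n' then 2 else -1 :=
  pvStep_lit 1 'n' c (by norm_num) (by decide)

theorem pvStep2 (c : Char) : pvStep 2 c = if c = 'i' then 3 else -1 :=
  pvStep_lit 2 'i' c (by norm_num) (by decide)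

theorem pvStepHex (s : Int) (c : Char) (hs : s = 3 ∨ s = 4 ∨ s = 5 ∨ s = 6) :
    pvStep s c = if pvHex c then s + 1 else -1 := by
  unfold pvStep
  rw [if_neg (by omega), if_pos (by omega), pv_isIn_hex]

theorem pvRun_cons_pos (s : Int) (c : Char) (l : List Char) (h : ¬ pvStep s c < 0) :
    pvRun s (c :: l) = pvRun (pvStep s c) l := by simp [pvRun, h]

theorem pvRun_cons_neg (s : Int) (c : Char) (l : List Char) (h : pvStep s c < 0) :
    pvRun s (c :: l) = false := by simp [pvRun, h]

-- the automaton accepts exactly the strings 'uni' + four hex digits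
theorem pvRun7 (c1 c2 c3 c4 c5 c6 c7 : Char) :
    pvRun 0 [c1, c2, c3, c4, c5, c6, c7] =
      ((c1 = 'u' : Bool) && (c2 = 'n' : Bool) && (c3 = 'i' : Bool) &&
        pvHex c4 && pvHex c5 && pvHex c6 && pvHex c7) := by
  by_cases h1 : c1 = 'u'
  · have e1 : pvStep 0 c1 = 1 := by rw [pvStep0, if_pos h1]
    rw [pvRun_cons_pos _ _ _ (by rw [e1]; norm_num), e1]
    by_cases h2 : c2 = 'n'
    · have e2 : pvStep 1 c2 = 2 := by rw [pvStep1, if_pos h2]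
      rw [pvRun_cons_pos _ _ _ (by rw [e2]; norm_num), e2]
      by_cases h3 : c3 = 'i'
      · have e3 : pvStep 2 c3 = 3 := by rw [pvStep2, if_pos h3]
        rw [pvRun_cons_pos _ _ _ (by rw [e3]; norm_num), e3]
        by_cases g4 : pvHex c4
        · have e4 : pvStep 3 c4 = 4 := by rw [pvStepHex 3 c4 (by norm_num), if_pos g4]; norm_num
          rw [pvRun_cons_pos _ _ _ (by rw [e4]; norm_num), e4]
          by_cases g5 : pvHex c5
          · have e5 : pvStep 4 c5 = 5 := by rw [pvStepHex 4 c5 (by norm_num), if_pos g5]; norm_num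
            rw [pvRun_cons_pos _ _ _ (by rw [e5]; norm_num), e5]
            by_cases g6 : pvHex c6
            · have e6 : pvStep 5 c6 = 6 := by rw [pvStepHex 5 c6 (by norm_num), if_pos g6]; norm_num
              rw [pvRun_cons_pos _ _ _ (by rw [e6]; norm_num), e6]
              by_cases g7 : pvHex c7
              · have e7 : pvStep 6 c7 = 7 := by rw [pvStepHex 6 c7 (by norm_num), if_pos g7]; norm_num
                rw [pvRun_cons_pos _ _ _ (by rw [e7]; norm_num), e7]
                simp [pvRun, h1, h2, h3, g4, g5, g6, g7]
              · have e7 : pvStep 6 c7 = -1 := by rw [pvStepHex 6 c7 (by norm_num), if_neg g7]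
                rw [pvRun_cons_neg _ _ _ (by rw [e7]; norm_num)]
                simp [g7]
            · have e6 : pvStep 5 c6 = -1 := by rw [pvStepHex 5 c6 (by norm_num), if_neg g6]
              rw [pvRun_cons_neg _ _ _ (by rw [e6]; norm_num)]
              simp [g6]
          · have e5 : pvStep 4 c5 = -1 := by rw [pvStepHex 4 c5 (by norm_num), if_neg g5]
            rw [pvRun_cons_neg _ _ _ (by rw [e5]; norm_num)]
            simp [g5]
        · have e4 : pvStep 3 c4 = -1 := by rw [pvStepHex 3 c4 (by norm_num), if_neg g4]
          rw [pvRun_cons_neg _ _ _ (by rw [e4]; norm_num)]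
          simp [g4]
      · have e3 : pvStep 2 c3 = -1 := by rw [pvStep2, if_neg h3]
        rw [pvRun_cons_neg _ _ _ (by rw [e3]; norm_num)]
        simp [h3]
    · have e2 : pvStep 1 c2 = -1 := by rw [pvStep1, if_neg h2]
      rw [pvRun_cons_neg _ _ _ (by rw [e2]; norm_num)]
      simp [h2]
  · have e1 : pvStep 0 c1 = -1 := by rw [pvStep0, if_neg h1]
    rw [pvRun_cons_neg _ _ _ (by rw [e1]; norm_num)]
    simp [h1]

-- ===== VERDICT (by name: the statement is the Claim_ definition above) =====
theorem is_default_name_spec : Claim_equal_is_default_name := by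
  intro name _
  unfold Spec_is_default_name is_default_name is_default_name_alt
  rw [PySem.Str.len_eq, PySem.Str.startswith_eq, PySem.Str.toList_slice,
      PySem.Chars.slice_eq_listSlice,
      PySem.List.slice_from_neg_ofNat name.toList 4 (by omega)]
  generalize name.toList = l
  by_cases hl : l.length = 7
  · rcases l with _|⟨c1,_|⟨c2,_|⟨c3,_|⟨c4,_|⟨c5,_|⟨c6,_|⟨c7,_|⟨c8,l⟩⟩⟩⟩⟩⟩⟩⟩ <;> simp_all
    rw [pvRun7]
    by_cases h1 : c1 = 'u' <;> by_cases h2 : c2 = 'n' <;> by_cases h3 : c3 = 'i' <;>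
      simp_all [PySem.Chars.startswith, pv_isIn_hex, Bool.and_assoc] <;>
      (by_cases g4 : pvHex c4 <;> by_cases g5 : pvHex c5 <;> by_cases g6 : pvHex c6 <;>
        by_cases g7 : pvHex c7 <;> simp_all <;> (intros; subst_vars; try simp_all) <;> (exact fun h => absurd h.symm (by assumption)))
  · have hl' : (l.length : Int) ≠ 7 := by exact_mod_cast hl
    rw [if_pos hl']
    rcases hb : pvRun 0 l with _ | _
    · rfl
    · have := pvRun_length l 0 hb; omega
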